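-- pv_equiv track=rewrite | github.com/daniel-reich/ubiquitous-fiesta | rbeuWab36FAiLj65m_3.py | grouping
-- ===== SOURCE A (Python) =====
-- def grouping(w):
--   groups = {}
--   for word in w:
--     n_up = 0
--     for char in word:
--       if char.isupper():
--         n_up+=1
--     if n_up not in groups.keys():
--       groups[n_up] = []
--     groups[n_up].append(word)
--   for key in groups.keys():
--     groups[key] = sorted(groups[key], key = str.casefold)
--   return groups
-- ===== SOURCE B (Python) =====
-- def grouping(w):
--     # sort once by casefold, then bucket in one pass; stable sort keeps each
--     # bucket casefold-ordered, so no per-group sorting is needed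
--     def n_up(word):
--         return sum(c.isupper() for c in word)
--     ordered = sorted(w, key=str.casefold)
--     groups = {n_up(word): [] for word in w}
--     for word in ordered:
--         groups[n_up(word)].append(word)
--     return groups
-- ===== Notes on version B (the rewrite author's own statement) =====
-- stated objective: alternative
-- what changed: A buckets words by uppercase count in input order and then sorts every bucket by casefold; B sorts the whole list once (stable, by casefold) and then buckets it in a single pass, relying on sort stability so no per-bucket sorting is needed.
import Mathlib
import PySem

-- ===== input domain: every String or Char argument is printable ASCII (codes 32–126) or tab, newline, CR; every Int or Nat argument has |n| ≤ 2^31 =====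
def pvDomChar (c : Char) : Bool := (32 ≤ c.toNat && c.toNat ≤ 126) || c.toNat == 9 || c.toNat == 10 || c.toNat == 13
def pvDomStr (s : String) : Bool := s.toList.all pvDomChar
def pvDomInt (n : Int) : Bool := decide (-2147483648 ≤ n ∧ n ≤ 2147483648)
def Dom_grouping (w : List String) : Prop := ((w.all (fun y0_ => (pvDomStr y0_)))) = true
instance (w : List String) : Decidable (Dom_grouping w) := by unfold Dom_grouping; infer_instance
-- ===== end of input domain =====

-- B replaces A's "bucket in input order, then sort every bucket" by "sort the whole
-- list once (stable, by casefold), then bucket in one pass"; same return value.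
-- str.casefold is ported as PySem.Str.lower, exact on the ASCII domain Dom_grouping.

-- ===== PORT A =====
def grouping (w : List String) : List (Int × List String) :=
  let groups :=
    w.foldl (fun (groups : PySem.Dict Int (List String)) word =>
      let n_up : Int := word.toList.foldl (fun n c => if PySem.Chars.isupper c then n + 1 else n) 0
      let groups := if groups.contains n_up then groups else groups.insert n_up ([] : List String)
      groups.modify n_up [] (fun g => g ++ [word])) PySem.Dict.empty
  let groups :=
    groups.keys.foldl (fun g key =>
      g.insert key (PySem.List.sorted (g.getD key []) (fun s => PySem.Str.lower s))) groups
  groups.items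

-- ===== PORT B =====
-- sum(c.isupper() for c in word)
def pvUpCount (word : String) : Int :=
  ((word.toList.map (fun c => if PySem.Chars.isupper c then (1 : Int) else 0)).sum)

def grouping_alt (w : List String) : List (Int × List String) :=
  let ordered := PySem.List.sorted w (fun s => PySem.Str.lower s)
  let groups :=
    w.foldl (fun (g : PySem.Dict Int (List String)) word =>
      g.insert (pvUpCount word) ([] : List String)) PySem.Dict.empty
  let groups :=
    ordered.foldl (fun g word => g.modify (pvUpCount word) [] (fun l => l ++ [word])) groups
  groups.items

-- ===== PRECONDITION & SPEC =====
def Spec_grouping (w : List String) (out : List (Int × List String)) : Prop := out = grouping_alt w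
instance (w : List String) (out : List (Int × List String)) : Decidable (Spec_grouping w out) := by unfold Spec_grouping; infer_instance

-- ===== CLAIM (what is proved, stated in full; the proofs are below) =====
def Claim_equal_grouping : Prop := ∀ (w : List String), Dom_grouping w → Spec_grouping w (grouping w)

-- ===== LEMMAS AND PROOFS =====

-- A's inner counting loop computes B's sum-of-indicators.
theorem pvCount_eq (word : String) :
    word.toList.foldl (fun n c => if PySem.Chars.isupper c then n + 1 else n) (0 : Int)
      = pvUpCount word := by
  rw [PySem.List.foldl_if_add_one, pvUpCount, PySem.List.sum_map_ite_one_zero]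
  simp

-- insertion below every element goes to the front
theorem pvInsertBy_all {α : Type} (b : α → α → Bool) (x : α) (l : List α)
    (h : ∀ z ∈ l, b x z = true) : PySem.List.insertBy b x l = x :: l := by
  cases l with
  | nil => rfl
  | cons y t => simp [PySem.List.insertBy, h y (by simp)]

-- one stable-insertion step commutes with filtering (on a key-sorted list)
theorem pvFilter_insertBy {α κ : Type} [LinearOrder κ] (key : α → κ) (p : α → Bool)
    (x : α) (ys : List α) (h : ys.Pairwise (fun a b => key a ≤ key b)) :
    (PySem.List.insertBy (fun a b => decide (key a < key b)) x ys).filter p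
      = if p x then PySem.List.insertBy (fun a b => decide (key a < key b)) x (ys.filter p)
        else ys.filter p := by
  induction ys with
  | nil => cases hp : p x <;> simp [PySem.List.insertBy, hp]
  | cons y t ih =>
    rcases List.pairwise_cons.1 h with ⟨hy, ht⟩
    by_cases hb : key x < key y
    · simp only [PySem.List.insertBy, hb, decide_true, if_true]
      cases hp : p x with
      | false => simp [List.filter, hp]
      | true =>
        cases hq : p y with
        | true => simp [List.filter, hp, hq, PySem.List.insertBy, hb]
        | false =>
          simp only [List.filter, hp, hq, if_true]
          rw [pvInsertBy_all]
          intro z hz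
          exact decide_eq_true (lt_of_lt_of_le hb (hy z (List.mem_of_mem_filter hz)))
    · simp only [PySem.List.insertBy, hb, decide_false]
      cases hp : p x with
      | false => simp [List.filter, hp, ih ht]
      | true =>
        cases hq : p y with
        | true => simp [List.filter, hp, hq, ih ht, PySem.List.insertBy, hb]
        | false => simp [List.filter, hp, hq, ih ht]

theorem pvSorted_append_singleton {α κ : Type} [LinearOrder κ] (key : α → κ) (xs : List α) (x : α) :
    PySem.List.sorted (xs ++ [x]) key
      = PySem.List.insertBy (fun a b => decide (key a < key b)) x (PySem.List.sorted xs key) := by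
  rw [PySem.List.sorted_eq_foldl_insertBy, PySem.List.sorted_eq_foldl_insertBy, List.foldl_append]
  rfl

-- STABILITY: filtering a stable key-sort = stable key-sort of the filtered list
theorem pvSorted_filter {α κ : Type} [LinearOrder κ] (key : α → κ) (p : α → Bool) (xs : List α) :
    (PySem.List.sorted xs key).filter p = PySem.List.sorted (xs.filter p) key := by
  induction xs using List.reverseRecOn with
  | nil => rfl
  | append_singleton xs x ih =>
    rw [pvSorted_append_singleton,
      pvFilter_insertBy key p x _ (PySem.List.sorted_pairwise xs key), List.filter_append]
    cases hp : p x with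
    | true => simp only [List.filter, hp, if_true, pvSorted_append_singleton, ih]
    | false => simp [List.filter, hp, ih]

-- one step of A's bucketing loop, pointwise
theorem pvA_step_getD (d : PySem.Dict Int (List String)) (word : String) (c : Int) :
    ((if d.contains (pvUpCount word) then d
      else d.insert (pvUpCount word) ([] : List String)).modify (pvUpCount word) []
        (fun g => g ++ [word])).getD c []
    = if c = pvUpCount word then d.getD c [] ++ [word] else d.getD c [] := by
  by_cases hc : d.contains (pvUpCount word) = true
  · rw [if_pos hc, PySem.Dict.getD_modify]
    split_ifs with h
    · rw [h]
    · rfl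
  · rw [if_neg hc, PySem.Dict.getD_modify]
    split_ifs with h
    · rw [h, PySem.Dict.getD_insert, if_pos rfl,
        PySem.Dict.getD_of_not_contains d _ (Bool.eq_false_iff.2 hc ▸ rfl)]
    · rw [PySem.Dict.getD_insert, if_neg h]

-- A's bucketing loop: bucket c holds the words with count c, in input order
theorem pvA_loop_getD (l : List String) (d : PySem.Dict Int (List String)) (c : Int) :
    (l.foldl (fun groups word =>
        (if groups.contains (pvUpCount word) then groups
         else groups.insert (pvUpCount word) ([] : List String)).modify (pvUpCount word) []
          (fun g => g ++ [word])) d).getD c []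
      = d.getD c [] ++ l.filter (fun word => pvUpCount word == c) := by
  induction l generalizing d with
  | nil => simp
  | cons word t ih =>
    rw [List.foldl_cons, ih, pvA_step_getD, List.filter_cons]
    by_cases h : pvUpCount word = c
    · simp [h]
    · simp [h, Ne.symm h]

theorem pvA_step_keys (d : PySem.Dict Int (List String)) (word : String) :
    ((if d.contains (pvUpCount word) then d
      else d.insert (pvUpCount word) ([] : List String)).modify (pvUpCount word) []
        (fun g => g ++ [word])).keys
    = PySem.Set.add d.keys (pvUpCount word) := by
  rw [PySem.Set.add_eq_ite]
  by_cases hc : d.contains (pvUpCount word) = true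
  · rw [if_pos hc, PySem.Dict.keys_modify,
      PySem.Dict.keys_insert_of_contains _ _ hc,
      if_pos ((PySem.Dict.contains_iff_mem_keys d _).1 hc)]
  · have hc' : d.contains (pvUpCount word) = false := Bool.eq_false_iff.2 hc
    rw [if_neg hc, PySem.Dict.keys_modify,
      PySem.Dict.keys_insert_of_contains _ _ (by
        rw [PySem.Dict.contains_insert]; simp),
      PySem.Dict.keys_insert_of_not_contains _ _ hc',
      if_neg (fun hm => hc ((PySem.Dict.contains_iff_mem_keys d _).2 hm))]

-- A's bucketing loop: keys in order of first occurrence of each count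
theorem pvA_loop_keys (l : List String) (d : PySem.Dict Int (List String)) :
    (l.foldl (fun groups word =>
        (if groups.contains (pvUpCount word) then groups
         else groups.insert (pvUpCount word) ([] : List String)).modify (pvUpCount word) []
          (fun g => g ++ [word])) d).keys
      = PySem.Set.update d.keys (l.map pvUpCount) := by
  induction l generalizing d with
  | nil => rfl
  | cons word t ih =>
    rw [List.foldl_cons, ih, List.map_cons, PySem.Set.update_cons, pvA_step_keys]

-- B's append loop, pointwise
theorem pvB_loop_getD (l : List String) (d : PySem.Dict Int (List String)) (c : Int) :
    (l.foldl (fun g word => g.modify (pvUpCount word) [] (fun v => v ++ [word])) d).getD c []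
      = d.getD c [] ++ l.filter (fun word => pvUpCount word == c) := by
  induction l generalizing d with
  | nil => simp
  | cons word t ih =>
    rw [List.foldl_cons, ih, PySem.Dict.getD_modify, List.filter_cons]
    by_cases h : pvUpCount word = c
    · simp [h]
    · simp [h, Ne.symm h]

-- B's append loop leaves the key list alone (all keys already present)
theorem pvB_loop_keys (l : List String) (d : PySem.Dict Int (List String))
    (h : ∀ word ∈ l, d.contains (pvUpCount word) = true) :
    (l.foldl (fun g word => g.modify (pvUpCount word) [] (fun v => v ++ [word])) d).keys
      = d.keys := by
  induction l generalizing d with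
  | nil => rfl
  | cons word t ih =>
    rw [List.foldl_cons]
    have hcont : ∀ w' ∈ t,
        (d.modify (pvUpCount word) [] (fun v => v ++ [word])).contains (pvUpCount w') = true := by
      intro w' hw'
      rw [PySem.Dict.modify, PySem.Dict.contains_insert]
      simp [h w' (List.mem_cons_of_mem _ hw')]
    rw [ih _ hcont, PySem.Dict.keys_modify,
      PySem.Dict.keys_insert_of_contains _ _ (h word (by simp))]

-- B's comprehension dict: every stored value is []
theorem pvB_init_getD (l : List String) (d : PySem.Dict Int (List String)) (c : Int)
    (h : d.getD c [] = []) :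
    (l.foldl (fun g word => g.insert (pvUpCount word) ([] : List String)) d).getD c [] = [] := by
  induction l generalizing d with
  | nil => exact h
  | cons word t ih =>
    rw [List.foldl_cons]
    refine ih _ ?_
    rw [PySem.Dict.getD_insert]
    split_ifs <;> simp [h]

-- A's second loop: sorts every bucket named in ks, keys unchanged
theorem pvSort_loop (ks : List Int) (d : PySem.Dict Int (List String))
    (hnd : ks.Nodup) (hc : ∀ x ∈ ks, d.contains x = true) :
    ((ks.foldl (fun g key =>
        g.insert key (PySem.List.sorted (g.getD key []) (fun s => PySem.Str.lower s))) d).keys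
        = d.keys)
    ∧ ∀ c, (ks.foldl (fun g key =>
        g.insert key (PySem.List.sorted (g.getD key []) (fun s => PySem.Str.lower s))) d).getD c []
        = if c ∈ ks then PySem.List.sorted (d.getD c []) (fun s => PySem.Str.lower s)
          else d.getD c [] := by
  induction ks generalizing d with
  | nil => simp
  | cons k t ih =>
    rw [List.nodup_cons] at hnd
    rw [List.foldl_cons]
    have hck : d.contains k = true := hc k (by simp)
    have hct : ∀ x ∈ t,
        (d.insert k (PySem.List.sorted (d.getD k []) (fun s => PySem.Str.lower s))).contains x = true := by
      intro x hx
      rw [PySem.Dict.contains_insert]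
      simp [hc x (List.mem_cons_of_mem _ hx)]
    obtain ⟨hk, hg⟩ := ih _ hnd.2 hct
    constructor
    · rw [hk, PySem.Dict.keys_insert_of_contains _ _ hck]
    · intro c
      rw [hg c, PySem.Dict.getD_insert]
      by_cases hck' : c = k
      · simp [hck', hnd.1]
      · by_cases hmt : c ∈ t <;> simp [hck', hmt]

theorem pvMain (w : List String) : grouping w = grouping_alt w := by
  unfold grouping grouping_alt
  simp only [pvCount_eq]
  set D1 := w.foldl (fun (groups : PySem.Dict Int (List String)) word =>
      (if groups.contains (pvUpCount word) then groups
       else groups.insert (pvUpCount word) ([] : List String)).modify (pvUpCount word) []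
        (fun g => g ++ [word])) PySem.Dict.empty with hD1
  have hkeys1 : D1.keys = PySem.Set.ofList (w.map pvUpCount) := by
    rw [hD1, pvA_loop_keys]
    simp [PySem.Set.update_nil_left]
  have hnd1 : D1.keys.Nodup := by rw [hkeys1]; exact PySem.Set.nodup_ofList _
  have hgd1 : ∀ c, D1.getD c [] = w.filter (fun word => pvUpCount word == c) := by
    intro c; rw [hD1, pvA_loop_getD]; simp
  obtain ⟨hk2, hg2⟩ := pvSort_loop D1.keys D1 hnd1
    (fun x hx => (PySem.Dict.contains_iff_mem_keys D1 x).2 hx)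
  set E1 := w.foldl (fun (g : PySem.Dict Int (List String)) word =>
      g.insert (pvUpCount word) ([] : List String)) PySem.Dict.empty with hE1
  have hkeysE1 : E1.keys = PySem.Set.ofList (w.map pvUpCount) := by
    rw [hE1, PySem.Dict.keys_foldl_insert_key w pvUpCount (fun _ _ => ([] : List String))]
    simp [PySem.Set.update_nil_left]
  have hgdE1 : ∀ c, E1.getD c [] = [] := by
    intro c; rw [hE1]; exact pvB_init_getD _ _ _ (PySem.Dict.getD_empty _ _)
  have hcontE1 : ∀ word ∈ PySem.List.sorted w (fun s => PySem.Str.lower s),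
      E1.contains (pvUpCount word) = true := by
    intro word hw
    rw [PySem.Dict.contains_iff_mem_keys, hkeysE1, PySem.Set.mem_ofList]
    exact List.mem_map_of_mem ((PySem.List.mem_sorted _ _ _ _).1 hw)
  have hkeysE2 := pvB_loop_keys _ E1 hcontE1
  have hgdE2 := fun c => pvB_loop_getD (PySem.List.sorted w (fun s => PySem.Str.lower s)) E1 c
  rw [PySem.Dict.items_eq_map_keys _ (by rw [hk2]; exact hnd1) ([] : List String),
    PySem.Dict.items_eq_map_keys _ (by rw [hkeysE2, hkeysE1]; exact PySem.Set.nodup_ofList _) ([] : List String),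
    hk2, hkeysE2, hkeysE1, ← hkeys1]
  refine List.map_congr_left ?_
  intro c hc
  rw [hg2 c, if_pos hc, hgd1 c, hgdE2 c, hgdE1 c, List.nil_append, pvSorted_filter]

-- ===== VERDICT (by name: the statement is the Claim_ definition above) =====
theorem grouping_spec : Claim_equal_grouping := by
  intro w _
  unfold Spec_grouping
  exact pvMain w
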